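-- pv_equiv track=rewrite | github.com/sky-wdl/Python-Leaning | lanqiao/2382超级质数.py | DoubleNumber
-- ===== SOURCE A (Python) =====
-- def DoubleNumber(a):
--     s = list(str(a))
--     if len(s) < 3:
--         return True
--     for i in range(len(s)-1):
--         if s[i] == s[i+1]:
--             return False
--     return True
-- ===== SOURCE B (Python) =====
-- from itertools import groupby
--
-- def DoubleNumber(a):
--     s = str(a)
--     if len(s) < 3:
--         return True
--     return ''.join(ch for ch, _ in groupby(s)) == s
-- ===== Notes on version B (the rewrite author's own statement) =====
-- stated objective: idiomatic
-- what changed: Replaces the index loop with early return by collapsing adjacent runs with itertools.groupby and comparing the collapsed string to the original.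
import Mathlib
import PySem

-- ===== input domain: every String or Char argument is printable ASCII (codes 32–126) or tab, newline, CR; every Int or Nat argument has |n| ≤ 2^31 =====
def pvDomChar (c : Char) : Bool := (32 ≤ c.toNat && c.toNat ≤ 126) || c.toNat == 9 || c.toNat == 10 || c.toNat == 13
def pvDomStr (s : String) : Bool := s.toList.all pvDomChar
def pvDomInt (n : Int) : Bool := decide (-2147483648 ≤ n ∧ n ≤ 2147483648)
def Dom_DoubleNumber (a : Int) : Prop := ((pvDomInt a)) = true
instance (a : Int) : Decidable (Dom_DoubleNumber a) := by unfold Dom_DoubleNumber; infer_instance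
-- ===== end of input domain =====

-- B replaces A's indexed early-return scan by collapsing adjacent runs and one whole-list comparison (idiomatic, same cost).

-- ===== PORT A =====
-- the 'for i in range(len(s)-1)' loop with early 'return False'
def pvLoopA (s : List Char) : List Int → Bool
  | [] => true
  | i :: rest => if PySem.List.pyGet? s i = PySem.List.pyGet? s (i + 1) then false else pvLoopA s rest

def DoubleNumber (a : Int) : Bool :=
  let s := PySem.Int.toChars a
  if s.length < 3 then true
  else pvLoopA s (PySem.List.pyRange 0 ((s.length : Int) - 1) 1)

-- ===== PORT B =====
-- ''.join(ch for ch, _ in groupby(s)): the first character of each run of equal adjacent characters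
def pvCollapse : List Char → List Char
  | [] => []
  | [c] => [c]
  | c :: d :: t => if c = d then pvCollapse (d :: t) else c :: pvCollapse (d :: t)

def DoubleNumber_alt (a : Int) : Bool :=
  let s := PySem.Int.toChars a
  if s.length < 3 then true
  else pvCollapse s == s

-- ===== PRECONDITION & SPEC =====
def Spec_DoubleNumber (a : Int) (out : Bool) : Prop := out = DoubleNumber_alt a
instance (a : Int) (out : Bool) : Decidable (Spec_DoubleNumber a out) := by unfold Spec_DoubleNumber; infer_instance

-- ===== CLAIM (what is proved, stated in full; the proofs are below) =====
def Claim_equal_DoubleNumber : Prop := ∀ (a : Int), Dom_DoubleNumber a → Spec_DoubleNumber a (DoubleNumber a)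

-- ===== LEMMAS AND PROOFS =====

-- common characterisation: the plain structural adjacent-pair scan
def pvPairScan : List Char → Bool
  | [] => true
  | [_] => true
  | c :: d :: t => if c = d then false else pvPairScan (d :: t)

lemma pvPairScan_short (s : List Char) (h : s.length ≤ 1) : pvPairScan s = true := by
  match s, h with
  | [], _ => rfl
  | [_], _ => rfl

lemma pvCollapse_length_le : ∀ s : List Char, (pvCollapse s).length ≤ s.length
  | [] => by simp [pvCollapse]
  | [_] => by simp [pvCollapse]
  | c :: d :: t => by
    have := pvCollapse_length_le (d :: t)
    by_cases h : c = d <;> simp [pvCollapse, h] <;> simp at this <;> omega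

lemma pvCollapse_beq : ∀ s : List Char, (pvCollapse s == s) = pvPairScan s
  | [] => rfl
  | [_] => by simp [pvCollapse, pvPairScan]
  | c :: d :: t => by
    by_cases h : c = d
    · have hlen := pvCollapse_length_le (d :: t)
      have hne : pvCollapse (d :: t) ≠ d :: d :: t := by
        intro he
        have := congrArg List.length he
        simp at this hlen; omega
      simp [pvCollapse, pvPairScan, h, hne]
    · have ih := pvCollapse_beq (d :: t)
      simp [pvCollapse, pvPairScan, h, List.cons_beq_cons, ih]

lemma pvLoopA_eq (s : List Char) :
    ∀ k i : Nat, s.length - i ≤ k →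
      pvLoopA s (PySem.List.pyRange (i : Int) ((s.length : Int) - 1) 1) = pvPairScan (s.drop i) := by
  intro k
  induction k with
  | zero =>
    intro i h
    have hi : s.length ≤ i := by omega
    rw [PySem.List.pyRange_one_eq_nil (by push_cast; omega)]
    rw [List.drop_eq_nil_of_le hi]
    rfl
  | succ k ih =>
    intro i h
    by_cases hlt : i + 1 < s.length
    · rw [PySem.List.pyRange_one_cons (by push_cast; omega)]
      have h1 : i < s.length := by omega
      have hcast : (i : Int) + 1 = ((i + 1 : Nat) : Int) := by push_cast; ring
      have hget1 : PySem.List.pyGet? s (i : Int) = some s[i] := by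
        rw [PySem.List.pyGet?_natCast]
        exact List.getElem?_eq_getElem h1
      have hget2 : PySem.List.pyGet? s ((i : Int) + 1) = some s[i + 1] := by
        rw [hcast, PySem.List.pyGet?_natCast]
        exact List.getElem?_eq_getElem hlt
      have hdrop1 : s.drop i = s[i] :: s.drop (i + 1) := List.drop_eq_getElem_cons h1
      have hdrop2 : s.drop (i + 1) = s[i + 1] :: s.drop (i + 2) := List.drop_eq_getElem_cons hlt
      by_cases heq : s[i] = s[i + 1]
      · have hcond : PySem.List.pyGet? s (i : Int) = PySem.List.pyGet? s ((i : Int) + 1) := by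
          rw [hget1, hget2, heq]
        rw [hdrop1, hdrop2]
        simp only [pvLoopA, pvPairScan, if_pos hcond, if_pos heq]
      · have hcond : ¬ PySem.List.pyGet? s (i : Int) = PySem.List.pyGet? s ((i : Int) + 1) := by
          rw [hget1, hget2]; simp [heq]
        rw [hdrop1, hdrop2]
        simp only [pvLoopA, if_neg hcond, pvPairScan, if_neg heq]
        rw [← hdrop2, hcast]
        exact ih (i + 1) (by omega)
    · rw [PySem.List.pyRange_one_eq_nil (by push_cast; omega)]
      rw [pvPairScan_short (s.drop i) (by simp; omega)]
      rfl

-- ===== VERDICT (by name: the statement is the Claim_ definition above) =====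
theorem DoubleNumber_spec : Claim_equal_DoubleNumber := by
  intro a _
  unfold Spec_DoubleNumber DoubleNumber DoubleNumber_alt
  set s := PySem.Int.toChars a with hs
  by_cases h : s.length < 3
  · simp [h]
  · have h0 := pvLoopA_eq s s.length 0 (by omega)
    simp only [Nat.cast_zero, List.drop_zero] at h0
    simp [h, h0, pvCollapse_beq]
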